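-- pv_equiv track=rewrite | github.com/Yzichen/mmLaneDet | mmlane/models/dense_heads/condlane_head.py | cal_num_params
-- ===== SOURCE A (Python) =====
-- def cal_num_params(
--                    in_channels,
--                    num_layers,
--                    disable_coords,
--                    out_channels=1):
--     """
--     Args:
--         in_channels: 64
--         num_layers: int
--         disable_coords: bool
--         out_channels: 1
--     Returns:
--         weight_nums: List[]
--         bias_nums: List[]
--     """
--     weight_nums, bias_nums = [], []
--     for l in range(num_layers):
--         if l == num_layers - 1:
--             if num_layers == 1:
--                 if not disable_coords:
--                     weight_nums.append((in_channels + 2) * out_channels)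
--                 else:
--                     weight_nums.append(in_channels * out_channels)
--             else:
--                 weight_nums.append(in_channels * out_channels)
--             bias_nums.append(out_channels)
--         elif l == 0:
--             if not disable_coords:
--                 weight_nums.append((in_channels + 2) * in_channels)
--             else:
--                 weight_nums.append(in_channels * in_channels)
--             bias_nums.append(in_channels)
--         else:
--             weight_nums.append(in_channels * in_channels)
--             bias_nums.append(in_channels)
--     return weight_nums, bias_nums
-- ===== SOURCE B (Python) =====
-- def cal_num_params(
--                    in_channels,
--                    num_layers,
--                    disable_coords,
--                    out_channels=1):
--     if num_layers < 1:
--         return [], []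
--     # Dimension sequence of the MLP: input fan (with 2 coord channels unless
--     # disabled), hidden fans, output fan. Weights are pairwise products of
--     # consecutive dims; biases are the output fans.
--     coord = 0 if disable_coords else 2
--     dims = [in_channels + coord] + [in_channels] * (num_layers - 1) + [out_channels]
--     weight_nums = [a * b for a, b in zip(dims, dims[1:])]
--     bias_nums = dims[1:]
--     return weight_nums, bias_nums
-- ===== Notes on version B (the rewrite author's own statement) =====
-- stated objective: alternative
-- what changed: B first builds the MLP's fan dimension sequence dims = [in_channels+coord] + [in_channels]*(num_layers-1) + [out_channels], then derives the weight counts as pairwise products zip(dims, dims[1:]) and the bias counts as dims[1:], replacing A's per-index branching loop.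
import Mathlib
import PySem

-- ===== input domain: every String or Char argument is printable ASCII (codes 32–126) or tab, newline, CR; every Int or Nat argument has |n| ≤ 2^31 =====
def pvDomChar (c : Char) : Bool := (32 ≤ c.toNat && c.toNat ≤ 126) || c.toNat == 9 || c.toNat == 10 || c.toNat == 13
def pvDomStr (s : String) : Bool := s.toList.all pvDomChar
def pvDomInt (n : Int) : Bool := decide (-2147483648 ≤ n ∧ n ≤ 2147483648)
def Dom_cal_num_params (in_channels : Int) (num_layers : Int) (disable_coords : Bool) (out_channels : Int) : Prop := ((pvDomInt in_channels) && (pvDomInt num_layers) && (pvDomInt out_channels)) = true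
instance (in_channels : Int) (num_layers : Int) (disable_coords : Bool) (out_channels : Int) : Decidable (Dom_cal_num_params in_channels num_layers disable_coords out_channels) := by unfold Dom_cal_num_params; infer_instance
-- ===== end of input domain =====

-- B builds the MLP fan-dimension sequence once and derives weights as pairwise products
-- (zip) and biases as its tail, instead of A's per-index branching loop; objective: alternative.

-- ===== PORT A =====
def cal_num_params (in_channels : Int) (num_layers : Int) (disable_coords : Bool) (out_channels : Int) : List Int × List Int :=
  (PySem.List.pyRange 0 num_layers 1).foldl (fun (st : List Int × List Int) l =>
    if l == num_layers - 1 then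
      if num_layers == 1 then
        if !disable_coords then (st.1 ++ [(in_channels + 2) * out_channels], st.2 ++ [out_channels])
        else (st.1 ++ [in_channels * out_channels], st.2 ++ [out_channels])
      else (st.1 ++ [in_channels * out_channels], st.2 ++ [out_channels])
    else if l == 0 then
      if !disable_coords then (st.1 ++ [(in_channels + 2) * in_channels], st.2 ++ [in_channels])
      else (st.1 ++ [in_channels * in_channels], st.2 ++ [in_channels])
    else (st.1 ++ [in_channels * in_channels], st.2 ++ [in_channels])) ([], [])

-- ===== PORT B =====
def cal_num_params_alt (in_channels : Int) (num_layers : Int) (disable_coords : Bool) (out_channels : Int) : List Int × List Int :=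
  if num_layers < 1 then ([], [])
  else
    let coord : Int := if disable_coords then 0 else 2
    let dims : List Int := (in_channels + coord) :: (List.replicate (num_layers - 1).toNat in_channels ++ [out_channels])
    ((dims.zip dims.tail).map (fun p => p.1 * p.2), dims.tail)

-- ===== PRECONDITION & SPEC =====
def Spec_cal_num_params (in_channels : Int) (num_layers : Int) (disable_coords : Bool) (out_channels : Int) (out : List Int × List Int) : Prop := out = cal_num_params_alt in_channels num_layers disable_coords out_channels
instance (in_channels : Int) (num_layers : Int) (disable_coords : Bool) (out_channels : Int) (out : List Int × List Int) : Decidable (Spec_cal_num_params in_channels num_layers disable_coords out_channels out) := by unfold Spec_cal_num_params; infer_instance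

-- ===== CLAIM (what is proved, stated in full; the proofs are below) =====
def Claim_equal_cal_num_params : Prop := ∀ (in_channels : Int) (num_layers : Int) (disable_coords : Bool) (out_channels : Int), Dom_cal_num_params in_channels num_layers disable_coords out_channels → Spec_cal_num_params in_channels num_layers disable_coords out_channels (cal_num_params in_channels num_layers disable_coords out_channels)

-- ===== LEMMAS AND PROOFS =====

-- Loop body of A's port, abstracted.
def pvBody (ic nl : Int) (dc : Bool) (oc : Int) (st : List Int × List Int) (l : Int) : List Int × List Int :=
  if l == nl - 1 then
    if nl == 1 then
      if !dc then (st.1 ++ [(ic + 2) * oc], st.2 ++ [oc])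
      else (st.1 ++ [ic * oc], st.2 ++ [oc])
    else (st.1 ++ [ic * oc], st.2 ++ [oc])
  else if l == 0 then
    if !dc then (st.1 ++ [(ic + 2) * ic], st.2 ++ [ic])
    else (st.1 ++ [ic * ic], st.2 ++ [ic])
  else (st.1 ++ [ic * ic], st.2 ++ [ic])

-- Middle iterations (1 ≤ l < nl-1) each append (ic*ic, ic).
theorem pvMid (ic nl : Int) (dc : Bool) (oc : Int) (k : Nat) (w b : List Int)
    (hk : 1 + (k : Int) ≤ nl - 1) :
    (PySem.List.pyRange 1 (1 + (k : Int)) 1).foldl (pvBody ic nl dc oc) (w, b)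
      = (w ++ List.replicate k (ic * ic), b ++ List.replicate k ic) := by
  induction k generalizing w b with
  | zero => simp [PySem.List.pyRange_one_eq_nil]
  | succ m ih =>
    have h1 : (1 : Int) ≤ 1 + (m : Int) := by omega
    have hsplit : PySem.List.pyRange 1 (1 + ((m : Int) + 1)) 1
        = PySem.List.pyRange 1 (1 + (m : Int)) 1 ++ [1 + (m : Int)] := by
      have := PySem.List.pyRange_one_succ_right (a := 1) (b := 1 + (m : Int)) h1
      simpa [add_assoc] using this
    have hmle : 1 + (m : Int) ≤ nl - 1 := by push_cast at hk ⊢; omega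
    push_cast
    rw [hsplit, List.foldl_append, ih _ _ hmle]
    have hne1 : (1 + (m : Int) == nl - 1) = false := by
      simp only [beq_eq_false_iff_ne]; push_cast at hk; omega
    have hne0 : (1 + (m : Int) == (0 : Int)) = false := by
      simp only [beq_eq_false_iff_ne]; omega
    simp [pvBody, hne1, hne0, List.replicate_succ']

-- Pairwise products over a constant run: zip of (x :: replicate m x ++ [y]) with its tail.
theorem pvZipMul (m : Nat) (x y : Int) :
    (((x :: (List.replicate m x ++ [y])).zip (List.replicate m x ++ [y])).map
        (fun p => p.1 * p.2))
      = List.replicate m (x * x) ++ [x * y] := by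
  induction m with
  | zero => simp
  | succ n ih => simp [List.replicate_succ] at ih ⊢; exact ih

theorem pvA_eq (ic nl : Int) (dc : Bool) (oc : Int) :
    cal_num_params ic nl dc oc = cal_num_params_alt ic nl dc oc := by
  show (PySem.List.pyRange 0 nl 1).foldl (pvBody ic nl dc oc) ([], [])
      = cal_num_params_alt ic nl dc oc
  by_cases h0 : nl < 1
  · rw [PySem.List.pyRange_one_eq_nil (by omega)]
    simp [cal_num_params_alt, h0]
  · by_cases h1 : nl = 1
    · subst h1
      rw [PySem.List.pyRange_one_cons (by norm_num), PySem.List.pyRange_one_eq_nil (by norm_num)]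
      cases dc <;> simp [pvBody, cal_num_params_alt]
    · -- nl ≥ 2
      have h2 : 2 ≤ nl := by omega
      have hsplit : PySem.List.pyRange 0 nl 1
          = PySem.List.pyRange 0 (nl - 1) 1 ++ [nl - 1] := by
        have := PySem.List.pyRange_one_succ_right (a := 0) (b := nl - 1) (by omega)
        simpa using this
      have hcons : PySem.List.pyRange 0 (nl - 1) 1
          = 0 :: PySem.List.pyRange 1 (nl - 1) 1 := by
        have := PySem.List.pyRange_one_cons (a := 0) (b := nl - 1) (by omega)
        simpa using this
      have hk : nl - 1 = 1 + ((nl - 2).toNat : Int) := by omega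
      rw [hsplit, List.foldl_append, hcons]
      have hz1 : ((0 : Int) == nl - 1) = false := by
        simp only [beq_eq_false_iff_ne]; omega
      have hn1 : (nl == 1) = false := by
        simp only [beq_eq_false_iff_ne]; omega
      have hfirst : pvBody ic nl dc oc ([], []) 0
          = ((if dc then [ic * ic] else [(ic + 2) * ic]), [ic]) := by
        cases dc <;> simp [pvBody, hz1]
      have hmid : ∀ w b : List Int,
          (PySem.List.pyRange 1 (nl - 1) 1).foldl (pvBody ic nl dc oc) (w, b)
            = (w ++ List.replicate (nl - 2).toNat (ic * ic), b ++ List.replicate (nl - 2).toNat ic) := by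
        intro w b; rw [hk]; exact pvMid ic nl dc oc (nl - 2).toNat w b (by omega)
      simp only [List.foldl_cons, hfirst]
      rw [hmid]
      have hrep : (nl - 1).toNat = (nl - 2).toNat + 1 := by omega
      cases dc <;>
        simp [pvBody, hn1, cal_num_params_alt, hrep, List.replicate_succ,
          pvZipMul, (by omega : ¬ nl < 1)]

-- ===== VERDICT (by name: the statement is the Claim_ definition above) =====
theorem cal_num_params_spec : Claim_equal_cal_num_params := by
  intro ic nl dc oc _
  show _ = _
  exact pvA_eq ic nl dc oc
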